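-- pv_equiv track=rewrite | github.com/florenciarouco/tallerDeGit | recu.py | gestion_ventas
-- ===== SOURCE A (Python) =====
-- from typing import List
-- from typing import Tuple
--
-- def gestion_ventas (ventas:List[Tuple[str,str,int]]) -> dict:
--     res = {}
--     for nombre,producto,total in ventas:
--         if not nombre in res:
--             res[nombre] = [(producto,total)]
--         else:
--             res[nombre].append((producto,total))
--     return res
-- ===== SOURCE B (Python) =====
-- def gestion_ventas(ventas):
--     # Two-phase: dedup the seller names in first-occurrence order, then build
--     # each seller's list by one filtered pass per seller (dict comprehension).
--     nombres = list(dict.fromkeys(nombre for nombre, _, _ in ventas))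
--     return {n: [(producto, total) for (m, producto, total) in ventas if m == n]
--             for n in nombres}
-- ===== Notes on version B (the rewrite author's own statement) =====
-- stated objective: alternative
-- what changed: Replaces the single-pass dict build (insert-or-append per element) with a two-phase grouped comprehension: dedup seller names in first-occurrence order, then one filtered pass over the input per seller.
import Mathlib
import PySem

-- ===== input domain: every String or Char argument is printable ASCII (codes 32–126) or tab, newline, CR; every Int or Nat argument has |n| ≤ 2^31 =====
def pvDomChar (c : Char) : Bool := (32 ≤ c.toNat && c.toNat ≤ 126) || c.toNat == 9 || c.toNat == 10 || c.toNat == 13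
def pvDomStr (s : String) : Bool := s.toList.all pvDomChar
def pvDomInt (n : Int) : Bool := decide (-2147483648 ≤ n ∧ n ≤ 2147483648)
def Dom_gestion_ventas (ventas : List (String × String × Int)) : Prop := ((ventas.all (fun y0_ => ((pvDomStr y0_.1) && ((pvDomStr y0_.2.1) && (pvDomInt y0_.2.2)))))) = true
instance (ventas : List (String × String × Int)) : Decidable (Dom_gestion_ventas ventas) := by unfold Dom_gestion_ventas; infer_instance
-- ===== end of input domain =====

-- B groups by a two-phase pass (dedup the seller names, then one filtered scan per name)
-- instead of A's single insert-or-append dict loop; same return value (alternative decomposition).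

-- ===== PORT A =====
def gestion_ventas (ventas : List (String × String × Int)) : List (String × List (String × Int)) :=
  (ventas.foldl
    (fun res v =>
      if ¬ res.contains v.1 then
        res.insert v.1 [(v.2.1, v.2.2)]
      else
        res.modify v.1 [] (fun l => l ++ [(v.2.1, v.2.2)]))
    (PySem.Dict.empty)).items

-- ===== PORT B =====
def gestion_ventas_alt (ventas : List (String × String × Int)) : List (String × List (String × Int)) :=
  (PySem.List.dedup (ventas.map (·.1))).map
    (fun n => (n, (ventas.filter (fun v => v.1 == n)).map (fun v => (v.2.1, v.2.2))))

-- ===== PRECONDITION & SPEC =====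
def Spec_gestion_ventas (ventas : List (String × String × Int)) (out : List (String × List (String × Int))) : Prop := out = gestion_ventas_alt ventas
instance (ventas : List (String × String × Int)) (out : List (String × List (String × Int))) : Decidable (Spec_gestion_ventas ventas out) := by unfold Spec_gestion_ventas; infer_instance

-- ===== CLAIM (what is proved, stated in full; the proofs are below) =====
def Claim_equal_gestion_ventas : Prop := ∀ (ventas : List (String × String × Int)), Dom_gestion_ventas ventas → Spec_gestion_ventas ventas (gestion_ventas ventas)

-- ===== LEMMAS AND PROOFS =====

-- A's two branches are both one `modify` step (inserting at a fresh key appends, exactly like modify with default []).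
theorem stepA_eq_modify (d : PySem.Dict String (List (String × Int))) (v : String × String × Int) :
    (if ¬ d.contains v.1 then
        d.insert v.1 [(v.2.1, v.2.2)]
      else
        d.modify v.1 [] (fun l => l ++ [(v.2.1, v.2.2)])) =
    d.modify v.1 [] (fun l => l ++ [v.2]) := by
  by_cases h : d.contains v.1
  · simp [h]
  · simp [h, PySem.Dict.modify, PySem.Dict.insert,
      PySem.Dict.getD_of_not_contains d [] (by simpa using h)]

-- The modify-loop's items are exactly B's grouped comprehension.
theorem items_modify_loop (ventas : List (String × String × Int)) :
    (ventas.foldl (fun res v => res.modify v.1 [] (fun l => l ++ [v.2])) PySem.Dict.empty).items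
    = (PySem.List.dedup (ventas.map (·.1))).map
        (fun n => (n, (ventas.filter (fun v => v.1 == n)).map (fun v => (v.2.1, v.2.2)))) := by
  have hnd : (ventas.foldl (fun res v => res.modify v.1 [] (fun l => l ++ [v.2])) PySem.Dict.empty).keys.Nodup :=
    PySem.Dict.nodup_keys_foldl_modify_key ventas (·.1) [] (fun _ v => fun l => l ++ [v.2]) PySem.Dict.empty (by simp)
  rw [PySem.Dict.items_eq_map_keys _ hnd []]
  rw [PySem.Dict.keys_foldl_modify_key]
  simp
  apply List.map_congr_left
  intro n hn
  rw [PySem.Dict.getD_foldl_modify_append]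
  simp

-- ===== VERDICT (by name: the statement is the Claim_ definition above) =====
theorem gestion_ventas_spec : Claim_equal_gestion_ventas := by
  intro ventas _
  unfold Spec_gestion_ventas gestion_ventas gestion_ventas_alt
  have hstep : (fun (res : PySem.Dict String (List (String × Int))) (v : String × String × Int) =>
      if ¬ res.contains v.1 then
        res.insert v.1 [(v.2.1, v.2.2)]
      else
        res.modify v.1 [] (fun l => l ++ [(v.2.1, v.2.2)]))
      = fun res v => res.modify v.1 [] (fun l => l ++ [v.2]) :=
    funext fun d => funext fun v => stepA_eq_modify d v
  rw [hstep, items_modify_loop]
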